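-- pv_equiv track=rewrite | github.com/GorbatovNik/efficient-dl-systems | week02_fast_pipelines/homework/task2/dataset.py | _basic_packing
-- ===== SOURCE A (Python) =====
-- PAD_TOKEN_ID = 0
--
-- def _basic_packing(sequences, max_length):
--     packed = []
--     current_ids = []
--     current_seq_id = 0
--     current_mask = []
--
--     for seq in sequences:
--         if len(current_ids) + len(seq) <= max_length:
--             current_mask.extend([current_seq_id] * len(seq))
--             current_ids.extend(seq)
--             current_seq_id += 1
--         else:
--             if current_ids:
--                 pad_len = max_length - len(current_ids)
--                 current_mask.extend([-1] * pad_len)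
--                 current_ids.extend([PAD_TOKEN_ID] * pad_len)
--                 packed.append((current_ids, current_mask))
--             current_ids = list(seq)
--             current_mask = [0] * len(seq)
--             current_seq_id = 1
--
--     if current_ids:
--         pad_len = max_length - len(current_ids)
--         current_mask.extend([-1] * pad_len)
--         current_ids.extend([PAD_TOKEN_ID] * pad_len)
--         packed.append((current_ids, current_mask))
--
--     return packed
-- ===== SOURCE B (Python) =====
-- PAD_TOKEN_ID = 0
--
-- def _basic_packing(sequences, max_length):
--     # Pass 1: greedily group sequences; a group is flushed only if it holds tokens.
--     groups = []
--     cur = []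
--     running = 0
--     for seq in sequences:
--         if running + len(seq) <= max_length:
--             cur.append(seq)
--             running += len(seq)
--         else:
--             if running > 0:
--                 groups.append(cur)
--             cur = [seq]
--             running = len(seq)
--     if running > 0:
--         groups.append(cur)
--     # Pass 2: materialize each group into (ids, mask) with padding.
--     packed = []
--     for group in groups:
--         ids = []
--         mask = []
--         for i, seq in enumerate(group):
--             ids.extend(seq)
--             mask.extend([i] * len(seq))
--         pad_len = max_length - len(ids)
--         ids.extend([PAD_TOKEN_ID] * pad_len)
--         mask.extend([-1] * pad_len)
--         packed.append((ids, mask))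
--     return packed
-- ===== Notes on version B (the rewrite author's own statement) =====
-- stated objective: alternative
-- what changed: Single interleaved loop that pads/flushes while accumulating is replaced by a two-pass decomposition: first greedily group the sequences (flushing a group only when it holds tokens), then materialize each group into a padded (ids, mask) pair via enumerate.
import Mathlib
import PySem

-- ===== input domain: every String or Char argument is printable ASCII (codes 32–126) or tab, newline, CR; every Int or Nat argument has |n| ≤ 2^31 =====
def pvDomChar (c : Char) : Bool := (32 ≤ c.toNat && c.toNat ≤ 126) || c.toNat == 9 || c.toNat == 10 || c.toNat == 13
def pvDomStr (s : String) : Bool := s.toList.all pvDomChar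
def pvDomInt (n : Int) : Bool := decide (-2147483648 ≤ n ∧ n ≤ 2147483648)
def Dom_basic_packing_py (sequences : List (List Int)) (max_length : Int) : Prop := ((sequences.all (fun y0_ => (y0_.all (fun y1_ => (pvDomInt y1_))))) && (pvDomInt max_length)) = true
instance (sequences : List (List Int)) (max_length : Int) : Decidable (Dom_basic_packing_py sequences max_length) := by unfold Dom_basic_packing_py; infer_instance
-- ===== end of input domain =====

-- B replaces A's single interleaved flush-while-accumulating loop by a two-pass
-- decomposition (group the sequences first, then materialize each group); same cost,
-- alternative structure.

-- ===== PORT A =====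
-- loop body of A; state: (packed, current_ids, current_seq_id, current_mask)
def pvStepA (max_length : Int)
    (st : List (List Int × List Int) × List Int × Int × List Int) (seq : List Int) :
    List (List Int × List Int) × List Int × Int × List Int :=
  match st with
  | (packed, current_ids, current_seq_id, current_mask) =>
    if (current_ids.length : Int) + (seq.length : Int) ≤ max_length then
      (packed, current_ids ++ seq, current_seq_id + 1,
       current_mask ++ List.replicate seq.length current_seq_id)
    else
      if current_ids ≠ [] then
        let pad_len := max_length - (current_ids.length : Int)
        (packed ++ [(current_ids ++ List.replicate pad_len.toNat 0,
                     current_mask ++ List.replicate pad_len.toNat (-1))],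
         seq, 1, List.replicate seq.length 0)
      else
        (packed, seq, 1, List.replicate seq.length 0)

def basic_packing_py (sequences : List (List Int)) (max_length : Int) : List (List Int × List Int) :=
  match sequences.foldl (pvStepA max_length) ([], [], 0, []) with
  | (packed, current_ids, _, current_mask) =>
    if current_ids ≠ [] then
      let pad_len := max_length - (current_ids.length : Int)
      packed ++ [(current_ids ++ List.replicate pad_len.toNat 0,
                  current_mask ++ List.replicate pad_len.toNat (-1))]
    else packed

-- ===== PORT B =====
-- pass 1 loop body of B; state: (groups, cur, running)
def pvStepB (max_length : Int)
    (st : List (List (List Int)) × List (List Int) × Int) (seq : List Int) :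
    List (List (List Int)) × List (List Int) × Int :=
  match st with
  | (groups, cur, running) =>
    if running + (seq.length : Int) ≤ max_length then
      (groups, cur ++ [seq], running + (seq.length : Int))
    else
      if running > 0 then (groups ++ [cur], [seq], (seq.length : Int))
      else (groups, [seq], (seq.length : Int))

-- pass 2: materialize one group into (ids, mask) with padding (enumerate loop)
def pvEmitGroup (group : List (List Int)) (max_length : Int) : List Int × List Int :=
  match group.foldl
    (fun (st : List Int × List Int × Int) seq =>
      match st with
      | (ids, mask, i) => (ids ++ seq, mask ++ List.replicate seq.length i, i + 1))
    ([], [], 0) with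
  | (ids, mask, _) =>
    let pad_len := max_length - (ids.length : Int)
    (ids ++ List.replicate pad_len.toNat 0, mask ++ List.replicate pad_len.toNat (-1))

def basic_packing_py_alt (sequences : List (List Int)) (max_length : Int) : List (List Int × List Int) :=
  match sequences.foldl (pvStepB max_length) ([], [], 0) with
  | (groups, cur, running) =>
    let groups := if running > 0 then groups ++ [cur] else groups
    groups.map (fun g => pvEmitGroup g max_length)

-- ===== PRECONDITION & SPEC =====
def Spec_basic_packing_py (sequences : List (List Int)) (max_length : Int) (out : List (List Int × List Int)) : Prop := out = basic_packing_py_alt sequences max_length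
instance (sequences : List (List Int)) (max_length : Int) (out : List (List Int × List Int)) : Decidable (Spec_basic_packing_py sequences max_length out) := by unfold Spec_basic_packing_py; infer_instance

-- ===== CLAIM (what is proved, stated in full; the proofs are below) =====
def Claim_equal_basic_packing_py : Prop := ∀ (sequences : List (List Int)) (max_length : Int), Dom_basic_packing_py sequences max_length → Spec_basic_packing_py sequences max_length (basic_packing_py sequences max_length)

-- ===== LEMMAS AND PROOFS =====

-- the mask a group contributes, starting at index i
def pvMaskAcc (g : List (List Int)) (i : Int) : List Int :=
  match g with
  | [] => []
  | s :: gs => List.replicate s.length i ++ pvMaskAcc gs (i + 1)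

theorem pvMaskAcc_snoc (g : List (List Int)) (s : List Int) (i : Int) :
    pvMaskAcc (g ++ [s]) i = pvMaskAcc g i ++ List.replicate s.length (i + (g.length : Int)) := by
  induction g generalizing i with
  | nil => simp [pvMaskAcc]
  | cons h t ih =>
    simp only [List.cons_append, pvMaskAcc, ih, List.length_cons, List.append_assoc]
    congr 3
    push_cast; ring

theorem pvEmit_fold (g : List (List Int)) (ids mask : List Int) (i : Int) :
    g.foldl
      (fun (st : List Int × List Int × Int) seq =>
        match st with
        | (ids, mask, i) => (ids ++ seq, mask ++ List.replicate seq.length i, i + 1))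
      (ids, mask, i)
    = (ids ++ g.flatten, mask ++ pvMaskAcc g i, i + (g.length : Int)) := by
  induction g generalizing ids mask i with
  | nil => simp [pvMaskAcc]
  | cons h t ih =>
    simp only [List.foldl_cons, ih, pvMaskAcc, List.flatten_cons, List.length_cons,
      List.append_assoc]
    congr 2
    push_cast; ring

theorem pvEmitGroup_eq (g : List (List Int)) (ml : Int) :
    pvEmitGroup g ml =
      (g.flatten ++ List.replicate (ml - (g.flatten.length : Int)).toNat 0,
       pvMaskAcc g 0 ++ List.replicate (ml - (g.flatten.length : Int)).toNat (-1)) := by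
  have h := pvEmit_fold g [] [] 0
  simp [pvEmitGroup, h]

-- abstraction: A's loop state as a function of B's loop state
def pvAbs (ml : Int) (g : List (List (List Int))) (c : List (List Int)) :
    List (List Int × List Int) × List Int × Int × List Int :=
  (g.map (fun x => pvEmitGroup x ml), c.flatten, (c.length : Int), pvMaskAcc c 0)

theorem pvStepA_fit (ml : Int) (g : List (List (List Int))) (c : List (List Int)) (s : List Int)
    (hfit : (c.flatten.length : Int) + (s.length : Int) ≤ ml) :
    pvStepA ml (pvAbs ml g c) s = pvAbs ml g (c ++ [s]) := by
  simp only [pvStepA, pvAbs]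
  rw [if_pos hfit]
  simp [pvMaskAcc_snoc]

theorem pvStepB_fit (ml : Int) (g : List (List (List Int))) (c : List (List Int)) (s : List Int)
    (hfit : (c.flatten.length : Int) + (s.length : Int) ≤ ml) :
    pvStepB ml (g, c, (c.flatten.length : Int)) s
      = (g, c ++ [s], (((c ++ [s]).flatten.length : Int))) := by
  simp only [pvStepB]
  rw [if_pos hfit]
  simp

theorem pvStepA_flush (ml : Int) (g : List (List (List Int))) (c : List (List Int)) (s : List Int)
    (hfit : ¬ ((c.flatten.length : Int) + (s.length : Int) ≤ ml)) (hne : c.flatten ≠ []) :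
    pvStepA ml (pvAbs ml g c) s = pvAbs ml (g ++ [c]) [s] := by
  simp only [pvStepA, pvAbs]
  rw [if_neg hfit, if_pos hne]
  simp [pvEmitGroup_eq, pvMaskAcc]

theorem pvStepB_flush (ml : Int) (g : List (List (List Int))) (c : List (List Int)) (s : List Int)
    (hfit : ¬ ((c.flatten.length : Int) + (s.length : Int) ≤ ml)) (hne : c.flatten ≠ []) :
    pvStepB ml (g, c, (c.flatten.length : Int)) s
      = (g ++ [c], [s], ((([s] : List (List Int)).flatten.length : Int))) := by
  have hr : ((c.flatten.length : Int)) > 0 := by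
    exact_mod_cast List.length_pos_of_ne_nil hne
  simp only [pvStepB]
  rw [if_neg hfit, if_pos hr]
  simp

theorem pvStepA_skip (ml : Int) (g : List (List (List Int))) (c : List (List Int)) (s : List Int)
    (hfit : ¬ ((c.flatten.length : Int) + (s.length : Int) ≤ ml)) (heq : c.flatten = []) :
    pvStepA ml (pvAbs ml g c) s = pvAbs ml g [s] := by
  simp only [pvStepA, pvAbs]
  rw [if_neg hfit, if_neg (by simp [heq] : ¬ c.flatten ≠ [])]
  simp [pvMaskAcc]

theorem pvStepB_skip (ml : Int) (g : List (List (List Int))) (c : List (List Int)) (s : List Int)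
    (hfit : ¬ ((c.flatten.length : Int) + (s.length : Int) ≤ ml)) (heq : c.flatten = []) :
    pvStepB ml (g, c, (c.flatten.length : Int)) s
      = (g, [s], ((([s] : List (List Int)).flatten.length : Int))) := by
  simp only [pvStepB]
  rw [if_neg hfit, if_neg (by simp [heq] : ¬ ((c.flatten.length : Int)) > 0)]
  simp

-- main loop correspondence
theorem pvLoop (ml : Int) (seqs : List (List Int))
    (g : List (List (List Int))) (c : List (List Int)) :
    seqs.foldl (pvStepA ml) (pvAbs ml g c)
      = (let p := seqs.foldl (pvStepB ml) (g, c, (c.flatten.length : Int))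
         pvAbs ml p.1 p.2.1)
    ∧ (seqs.foldl (pvStepB ml) (g, c, (c.flatten.length : Int))).2.2
      = (((seqs.foldl (pvStepB ml) (g, c, (c.flatten.length : Int))).2.1.flatten.length : Int)) := by
  induction seqs generalizing g c with
  | nil => exact ⟨rfl, rfl⟩
  | cons s t ih =>
    rw [List.foldl_cons, List.foldl_cons]
    by_cases hfit : (c.flatten.length : Int) + (s.length : Int) ≤ ml
    · rw [pvStepA_fit ml g c s hfit, pvStepB_fit ml g c s hfit]
      exact ih g (c ++ [s])
    · by_cases heq : c.flatten = []
      · rw [pvStepA_skip ml g c s hfit heq, pvStepB_skip ml g c s hfit heq]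
        exact ih g [s]
      · rw [pvStepA_flush ml g c s hfit heq, pvStepB_flush ml g c s hfit heq]
        exact ih (g ++ [c]) [s]

-- ===== VERDICT (by name: the statement is the Claim_ definition above) =====
theorem basic_packing_py_spec : Claim_equal_basic_packing_py := by
  intro seqs ml _
  show basic_packing_py seqs ml = basic_packing_py_alt seqs ml
  have hinit : (([], [], 0, []) : List (List Int × List Int) × List Int × Int × List Int)
      = pvAbs ml [] [] := by simp [pvAbs, pvMaskAcc]
  have hinit2 : ((0 : Int)) = ((([] : List (List Int)).flatten.length : Int)) := by simp
  obtain ⟨h1, h2⟩ := pvLoop ml seqs [] []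
  unfold basic_packing_py basic_packing_py_alt
  rw [hinit, hinit2, h1]
  set st := seqs.foldl (pvStepB ml) (([] : List (List (List Int))), ([] : List (List Int)),
    ((([] : List (List Int)).flatten.length : Int))) with hst
  obtain ⟨gs, cur, run⟩ := st
  simp only at h2
  by_cases hne : cur.flatten = []
  · have : ¬ run > 0 := by rw [h2]; simp [hne]
    simp [pvAbs, hne, this]
  · have hr : run > 0 := by
      rw [h2]; exact_mod_cast List.length_pos_of_ne_nil hne
    simp [pvAbs, hne, hr, pvEmitGroup_eq]
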